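-- pv_equiv track=rewrite | github.com/AlekseevVladimir/Web | src/dataprocessor.py | define_post_type
-- ===== SOURCE A (Python) =====
-- class PostType(object):
--     TOWN = 1
--     MARKET = 2
--     STORAGE = 3
--
-- def define_post_type(posts):
-- 	town_idx = []
-- 	market_idx = []
-- 	storage_idx = []
-- 	for i in posts:
-- 		if i["type"] == PostType.TOWN:
-- 			town_idx.append(i["point_idx"])
-- 		elif i["type"] == PostType.MARKET:
-- 			market_idx.append(i["point_idx"])
-- 		elif i["type"] == PostType.STORAGE:
-- 			storage_idx.append(i["point_idx"])
-- 	return town_idx, market_idx, storage_idx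
-- ===== SOURCE B (Python) =====
-- class PostType(object):
--     TOWN = 1
--     MARKET = 2
--     STORAGE = 3
--
-- def define_post_type(posts):
--     town_idx = [p["point_idx"] for p in posts if p["type"] == PostType.TOWN]
--     market_idx = [p["point_idx"] for p in posts if p["type"] == PostType.MARKET]
--     storage_idx = [p["point_idx"] for p in posts if p["type"] == PostType.STORAGE]
--     return town_idx, market_idx, storage_idx
-- ===== Notes on version B (the rewrite author's own statement) =====
-- stated objective: idiomatic
-- what changed: Replaces the single branch-dispatched bucketing loop with three independent filter-and-project comprehensions, one scan per post type.
import Mathlib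
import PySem

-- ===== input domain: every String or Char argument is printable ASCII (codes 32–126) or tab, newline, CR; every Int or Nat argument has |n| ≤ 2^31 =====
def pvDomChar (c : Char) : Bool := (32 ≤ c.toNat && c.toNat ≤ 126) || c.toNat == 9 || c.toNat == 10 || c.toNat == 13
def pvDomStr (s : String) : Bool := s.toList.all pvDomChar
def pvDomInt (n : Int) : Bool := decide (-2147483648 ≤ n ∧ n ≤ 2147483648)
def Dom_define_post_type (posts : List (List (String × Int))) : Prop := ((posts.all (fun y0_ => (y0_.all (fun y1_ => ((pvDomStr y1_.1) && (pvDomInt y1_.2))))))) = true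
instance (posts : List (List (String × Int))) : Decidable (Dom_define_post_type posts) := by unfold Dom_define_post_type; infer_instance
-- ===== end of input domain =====

-- B buckets the posts with three independent filter-and-project passes instead of A's single
-- branch-dispatched loop (idiomatic; same return value wherever A returns).

-- first-match association-list lookup: Python dict access d[k] (some v, none = KeyError)
def pvLookup : List (String × Int) → String → Option Int
  | [], _ => none
  | (k, v) :: rest, s => if k == s then some v else pvLookup rest s

-- ===== PORT A =====
-- single pass; the three accumulators are the loop state, appended to in branch order
def define_post_type (posts : List (List (String × Int))) : List Int × List Int × List Int :=
  posts.foldl (fun acc i =>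
    if pvLookup i "type" == some 1 then
      (acc.1 ++ [(pvLookup i "point_idx").getD 0], acc.2.1, acc.2.2)
    else if pvLookup i "type" == some 2 then
      (acc.1, acc.2.1 ++ [(pvLookup i "point_idx").getD 0], acc.2.2)
    else if pvLookup i "type" == some 3 then
      (acc.1, acc.2.1, acc.2.2 ++ [(pvLookup i "point_idx").getD 0])
    else acc) ([], [], [])

-- ===== PORT B =====
-- three independent comprehensions, one per post type
def define_post_type_alt (posts : List (List (String × Int))) : List Int × List Int × List Int :=
  ((posts.filter (fun p => pvLookup p "type" == some 1)).map (fun p => (pvLookup p "point_idx").getD 0),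
   (posts.filter (fun p => pvLookup p "type" == some 2)).map (fun p => (pvLookup p "point_idx").getD 0),
   (posts.filter (fun p => pvLookup p "type" == some 3)).map (fun p => (pvLookup p "point_idx").getD 0))

-- ===== PRECONDITION & SPEC =====
-- Pre_ excludes exactly the inputs on which Python A raises KeyError: a post without a "type" key,
-- or a post of type 1/2/3 without a "point_idx" key.
def Pre_define_post_type (posts : List (List (String × Int))) : Prop :=
  (posts.all (fun i =>
    match i.lookup "type" with
    | none => false
    | some t => if t = 1 ∨ t = 2 ∨ t = 3 then (i.lookup "point_idx").isSome else true)) = true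
instance (posts : List (List (String × Int))) : Decidable (Pre_define_post_type posts) := by
  unfold Pre_define_post_type; infer_instance

def pvWitness_define_post_type : (List (List (String × Int))) :=
  [[("type", 1), ("point_idx", 5)], [("type", 2), ("point_idx", 6)], [("type", 4)]]

def Spec_define_post_type (posts : List (List (String × Int))) (out : List Int × List Int × List Int) : Prop := out = define_post_type_alt posts
instance (posts : List (List (String × Int))) (out : List Int × List Int × List Int) : Decidable (Spec_define_post_type posts out) := by unfold Spec_define_post_type; infer_instance

-- ===== CLAIM (what is proved, stated in full; the proofs are below) =====
def Claim_equal_define_post_type : Prop := ∀ (posts : List (List (String × Int))), Dom_define_post_type posts → Pre_define_post_type posts → Spec_define_post_type posts (define_post_type posts)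

-- ===== LEMMAS AND PROOFS =====
lemma define_post_type_loop (posts : List (List (String × Int))) (t m s : List Int) :
    posts.foldl (fun acc i =>
      if pvLookup i "type" == some 1 then
        (acc.1 ++ [(pvLookup i "point_idx").getD 0], acc.2.1, acc.2.2)
      else if pvLookup i "type" == some 2 then
        (acc.1, acc.2.1 ++ [(pvLookup i "point_idx").getD 0], acc.2.2)
      else if pvLookup i "type" == some 3 then
        (acc.1, acc.2.1, acc.2.2 ++ [(pvLookup i "point_idx").getD 0])
      else acc) (t, m, s)
    = (t ++ (posts.filter (fun p => pvLookup p "type" == some 1)).map (fun p => (pvLookup p "point_idx").getD 0),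
       m ++ (posts.filter (fun p => pvLookup p "type" == some 2)).map (fun p => (pvLookup p "point_idx").getD 0),
       s ++ (posts.filter (fun p => pvLookup p "type" == some 3)).map (fun p => (pvLookup p "point_idx").getD 0)) := by
  induction posts generalizing t m s with
  | nil => simp
  | cons p rest ih =>
    simp only [List.foldl_cons, List.filter_cons]
    split_ifs with h1 h2 h3 <;> simp_all

-- ===== VERDICT (by name: the statement is the Claim_ definition above) =====
theorem define_post_type_spec : Claim_equal_define_post_type := by
  intro posts _ _
  show _ = _
  rw [define_post_type, define_post_type_loop]
  simp [define_post_type_alt]
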